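-- pv_equiv track=rewrite | github.com/peesusanthosh/DirectMachineTranslator-IBMModel1 | problem1_strategies.py | consecutiveSameWords
-- ===== SOURCE A (Python) =====
-- def consecutiveSameWords(line):
--     removeWords = []
--     removeWords.append(line[0])
--     for i in range(1, len(line)):
--         current = line[i]
--         previous = line[i-1]
--         if current[0] != previous[0]:
--             removeWords.append(current)
--     return removeWords
-- ===== SOURCE B (Python) =====
-- def consecutiveSameWords(line):
--     first = line[0]
--     if len(line) == 1:
--         return [first]
--     leaders = []
--     i, n = 0, len(line)
--     while i < n:
--         w = line[i]
--         leaders.append(w)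
--         k = w[0]
--         i += 1
--         while i < n and line[i][0] == k:
--             i += 1
--     return leaders
-- ===== Notes on version B (the rewrite author's own statement) =====
-- stated objective: alternative
-- what changed: B walks maximal runs of words sharing a first character and emits each run's leader (outer loop over runs with an inner skip), instead of A's index loop comparing each word with its predecessor and filtering.
-- outside the precondition, e.g. on consecutiveSameWords([]): A raises IndexError, B raises IndexError; on consecutiveSameWords(['a', '']): A raises IndexError, B raises IndexError
import Mathlib
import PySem

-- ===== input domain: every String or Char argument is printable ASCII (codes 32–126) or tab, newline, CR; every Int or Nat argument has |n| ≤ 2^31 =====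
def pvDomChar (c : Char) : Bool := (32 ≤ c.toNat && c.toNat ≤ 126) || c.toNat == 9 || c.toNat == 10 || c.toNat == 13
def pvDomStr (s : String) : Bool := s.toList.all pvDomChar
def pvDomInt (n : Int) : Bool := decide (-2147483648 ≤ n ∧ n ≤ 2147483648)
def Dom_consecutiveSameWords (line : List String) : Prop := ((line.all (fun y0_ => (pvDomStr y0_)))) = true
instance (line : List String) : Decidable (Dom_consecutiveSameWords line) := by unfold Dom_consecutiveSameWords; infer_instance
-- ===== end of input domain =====

-- B walks maximal runs of words sharing a first character and emits each run's leader,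
-- instead of A's index loop comparing each word to its predecessor (objective: alternative, same cost).

-- ===== PORT A =====
-- literal port of A: loop over range(1, len(line)), compare first chars, append on difference
def consecutiveSameWords (line : List String) : List String :=
  (PySem.List.pyRange 1 (line.length : Int) 1).foldl
    (fun removeWords i =>
      let current := PySem.List.pyGetD line i ""
      let previous := PySem.List.pyGetD line (i - 1) ""
      if PySem.Str.pyGet? current 0 ≠ PySem.Str.pyGet? previous 0 then
        removeWords ++ [current]
      else removeWords)
    [PySem.List.pyGetD line 0 ""]

-- ===== PORT B =====
-- run skipper: from a leader's first-char key, skip the rest of its run (B's inner while loop)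
-- leaders of maximal runs (B's outer while loop): emit the head, skip its run, recurse
def pvRunLeaders : List String → List String
  | [] => []
  | w :: rest =>
      w :: pvRunLeaders (rest.dropWhile (fun x => PySem.Str.pyGet? x 0 == PySem.Str.pyGet? w 0))
termination_by l => l.length
decreasing_by
  simpa using Nat.lt_succ_of_le (List.length_dropWhile_le _ _)

def consecutiveSameWords_alt (line : List String) : List String :=
  match line with
  | [] => []                -- Python B raises IndexError here (outside Pre_)
  | [first] => [first]
  | _ => pvRunLeaders line

-- ===== PRECONDITION & SPEC =====
-- A (and B) raise IndexError on the empty list, and — via current[0]/previous[0] — whenever the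
-- list has ≥ 2 elements and contains an empty string; Pre_ excludes exactly those inputs.
def Pre_consecutiveSameWords (line : List String) : Prop :=
  line ≠ [] ∧ (line.length = 1 ∨ ∀ w ∈ line, w ≠ "")
instance (line : List String) : Decidable (Pre_consecutiveSameWords line) := by
  unfold Pre_consecutiveSameWords; infer_instance

def pvWitness_consecutiveSameWords : List String := ["ab", "ax", "b"]

def Spec_consecutiveSameWords (line : List String) (out : List String) : Prop :=
  out = consecutiveSameWords_alt line
instance (line : List String) (out : List String) : Decidable (Spec_consecutiveSameWords line out) := by
  unfold Spec_consecutiveSameWords; infer_instance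

-- ===== CLAIM (what is proved, stated in full; the proofs are below) =====
def Claim_equal_consecutiveSameWords : Prop :=
  ∀ (line : List String), Dom_consecutiveSameWords line → Pre_consecutiveSameWords line →
    Spec_consecutiveSameWords line (consecutiveSameWords line)

-- ===== LEMMAS AND PROOFS =====

-- canonical "keep the words whose first char differs from the predecessor's"
def pvKeep : String → List String → List String
  | _, [] => []
  | prev, w :: rest =>
      (if PySem.Str.pyGet? w 0 ≠ PySem.Str.pyGet? prev 0 then [w] else []) ++ pvKeep w rest

theorem pvKeep_congr (p q : String) (l : List String)
    (h : PySem.Str.pyGet? p 0 = PySem.Str.pyGet? q 0) : pvKeep p l = pvKeep q l := by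
  cases l with
  | nil => rfl
  | cons x xs => simp only [pvKeep, h]

theorem pvKeep_dropWhile (w : String) (rest : List String) :
    pvKeep w rest =
      match rest.dropWhile (fun x => PySem.Str.pyGet? x 0 == PySem.Str.pyGet? w 0) with
      | [] => []
      | x :: l => x :: pvKeep x l := by
  induction rest generalizing w with
  | nil => rfl
  | cons x xs ih =>
    by_cases h : PySem.Str.pyGet? x 0 = PySem.Str.pyGet? w 0
    · have hb : (PySem.Str.pyGet? x 0 == PySem.Str.pyGet? w 0) = true := beq_iff_eq.mpr h
      rw [show pvKeep w (x :: xs) = pvKeep x xs by simp only [pvKeep, h]; simp,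
        pvKeep_congr x w xs h, List.dropWhile_cons]
      simp only [hb, if_pos]
      exact ih w
    · have hb : (PySem.Str.pyGet? x 0 == PySem.Str.pyGet? w 0) = false := beq_eq_false_iff_ne.mpr h
      rw [List.dropWhile_cons]
      simp only [hb, Bool.false_eq_true, if_false]
      simp only [pvKeep, if_pos h]
      simp

theorem pvRunLeaders_eq (w : String) (rest : List String) :
    pvRunLeaders (w :: rest) = w :: pvKeep w rest := by
  induction hn : rest.length using Nat.strong_induction_on generalizing w rest with
  | _ n ih =>
    rw [pvRunLeaders, pvKeep_dropWhile]
    cases hd : rest.dropWhile (fun x => PySem.Str.pyGet? x 0 == PySem.Str.pyGet? w 0) with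
    | nil => simp [pvRunLeaders]
    | cons x l =>
      have hle : (x :: l).length ≤ rest.length := hd ▸ List.length_dropWhile_le _ _
      have : l.length < n := by simp at hle; omega
      rw [ih l.length this x l rfl]

-- A's loop, generalized: from index j (1 ≤ j) the loop appends pvKeep of the tail from j
theorem loopA (line : List String) (acc : List String) (j : Nat) (hj : 1 ≤ j) :
    (PySem.List.pyRange (j : Int) (line.length : Int) 1).foldl
      (fun removeWords i =>
        let current := PySem.List.pyGetD line i ""
        let previous := PySem.List.pyGetD line (i - 1) ""
        if PySem.Str.pyGet? current 0 ≠ PySem.Str.pyGet? previous 0 then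
          removeWords ++ [current]
        else removeWords) acc
    = acc ++ pvKeep (PySem.List.pyGetD line ((j : Int) - 1) "") (line.drop j) := by
  induction hm : line.length - j using Nat.strong_induction_on generalizing j acc with
  | _ m ih =>
    by_cases hend : line.length ≤ j
    · rw [PySem.List.pyRange_one_eq_nil (by exact_mod_cast hend),
        List.drop_eq_nil_of_le hend]
      simp [pvKeep]
    · push_neg at hend
      have hjlt : (j : Int) < (line.length : Int) := by exact_mod_cast hend
      rw [PySem.List.pyRange_one_cons hjlt]
      simp only [List.foldl_cons]
      have hdrop : line.drop j = PySem.List.pyGetD line (j : Int) "" :: line.drop (j + 1) := by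
        rw [List.drop_eq_getElem_cons hend, PySem.List.pyGetD_natCast]
        congr 1
        simp [List.getD_eq_getElem?_getD, List.getElem?_eq_getElem hend]
      have hrec := fun acc' => ih (line.length - (j + 1)) (by omega) acc' (j + 1) (by omega) rfl
      have hc1 : ((j + 1 : Nat) : Int) = (j : Int) + 1 := by push_cast; ring
      simp only [hc1] at hrec
      rw [show (j : Int) + 1 - 1 = (j : Int) by ring] at hrec
      rw [hdrop]
      simp only [pvKeep]
      by_cases hif : PySem.Str.pyGet? (PySem.List.pyGetD line (j : Int) "") 0
          ≠ PySem.Str.pyGet? (PySem.List.pyGetD line ((j : Int) - 1) "") 0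
      · simp only [if_pos hif]
        rw [hrec (acc ++ [PySem.List.pyGetD line (j : Int) ""])]
        simp [List.append_assoc]
      · simp only [if_neg hif]
        rw [hrec acc]
        simp

theorem A_eq (w : String) (rest : List String) :
    consecutiveSameWords (w :: rest) = w :: pvKeep w rest := by
  unfold consecutiveSameWords
  have h := loopA (w :: rest) [PySem.List.pyGetD (w :: rest) 0 ""] 1 le_rfl
  norm_num at h ⊢
  rw [h]

-- ===== VERDICT (by name: the statement is the Claim_ definition above) =====
theorem consecutiveSameWords_spec : Claim_equal_consecutiveSameWords := by
  intro line _ hpre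
  unfold Spec_consecutiveSameWords
  obtain ⟨hne, _⟩ := hpre
  match line, hne with
  | [w], _ => simp [consecutiveSameWords_alt, A_eq, pvKeep]
  | w :: x :: rest, _ =>
    show consecutiveSameWords _ = consecutiveSameWords_alt _
    rw [A_eq]
    simp only [consecutiveSameWords_alt]
    rw [pvRunLeaders_eq]
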